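-- pv_equiv track=rewrite | github.com/WSm-77/algorithms_and_data_structures | exams/2021-22/term1/exercise_a/egz1a_better.py | snow
-- ===== SOURCE A (Python) =====
-- def snow( S ):
--     # tu prosze wpisac wlasna implementacje
--     n = len(S)
--     S.sort(reverse=True)
--     daysLeft = 0
--     snowSum = 0
--     while daysLeft < n and S[daysLeft] > daysLeft:
--         snowSum += S[daysLeft]
--         daysLeft += 1
--
--     return snowSum - (daysLeft*(daysLeft - 1)) // 2
-- ===== SOURCE B (Python) =====
-- def snow(S):
--     S.sort(reverse=True)
--     n = len(S)
--     P = [0] * (n + 1)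
--     for k in range(n):
--         P[k + 1] = P[k] + S[k]
--     lo, hi = 0, n
--     while lo < hi:
--         mid = (lo + hi) // 2
--         if S[mid] > mid:
--             lo = mid + 1
--         else:
--             hi = mid
--     d = lo
--     return P[d] - d * (d - 1) // 2
-- ===== Notes on version B (the rewrite author's own statement) =====
-- stated objective: alternative
-- what changed: Replaces A's incremental greedy scan (counting days and accumulating snow in one early-stopping while loop) by a prefix-sum table plus a binary search for the boundary d = number of indices with S[i] > i, combining them in the closed form P[d] - d*(d-1)//2.
import Mathlib
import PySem

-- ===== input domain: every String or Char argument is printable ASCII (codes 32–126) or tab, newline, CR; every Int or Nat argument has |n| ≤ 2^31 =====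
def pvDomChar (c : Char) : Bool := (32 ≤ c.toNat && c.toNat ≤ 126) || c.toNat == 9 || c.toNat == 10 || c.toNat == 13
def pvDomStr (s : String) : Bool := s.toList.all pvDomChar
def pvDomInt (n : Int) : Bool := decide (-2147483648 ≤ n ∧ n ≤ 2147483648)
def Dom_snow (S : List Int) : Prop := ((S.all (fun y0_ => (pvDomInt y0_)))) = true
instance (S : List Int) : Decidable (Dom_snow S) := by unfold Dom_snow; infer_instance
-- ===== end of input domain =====

-- B replaces A's early-stopping greedy scan by a prefix-sum table plus a binary search
-- for the boundary d = #{i | S[i] > i}, returning P[d] - d*(d-1)//2 (objective: alternative).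
-- Both A and B sort S in place (same side effect); the theorems are about the return value.

-- ===== PORT A =====
-- the while loop: state (daysLeft, snowSum), scanning the sorted list from the front
def snowLoop : List Int → Int → Int → Int × Int
  | [], d, s => (d, s)
  | x :: xs, d, s => if x > d then snowLoop xs (d + 1) (s + x) else (d, s)

def snow (S : List Int) : Int :=
  let T := PySem.List.sorted S (fun x => x) true
  let r := snowLoop T 0 0
  r.2 - PySem.Int.floordiv (r.1 * (r.1 - 1)) 2

-- ===== PORT B =====
-- the prefix-sum building loop: P[k+1] = P[k] + S[k], started with P[0] = 0
def psums (a : Int) : List Int → List Int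
  | [] => [a]
  | x :: xs => a :: psums (a + x) xs

-- the binary-search loop; lo, hi are Nat (in Python they stay within 0..n, where
-- Nat `(lo+hi)/2` equals Python's `(lo+hi)//2`); S[mid] is ported as getD (mid is
-- always in range: lo ≤ mid < hi ≤ n, so Python never raises here)
def bsearch (T : List Int) (lo hi : Nat) : Nat :=
  if h : lo < hi then
    let mid := (lo + hi) / 2
    if T.getD mid 0 > (mid : Int) then bsearch T (mid + 1) hi else bsearch T lo mid
  else lo
termination_by hi - lo
decreasing_by all_goals omega

def snow_alt (S : List Int) : Int :=
  let T := PySem.List.sorted S (fun x => x) true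
  let P := psums 0 T
  let d := bsearch T 0 T.length
  P.getD d 0 - PySem.Int.floordiv ((d : Int) * ((d : Int) - 1)) 2

-- ===== PRECONDITION & SPEC =====
def Spec_snow (S : List Int) (out : Int) : Prop := out = snow_alt S
instance (S : List Int) (out : Int) : Decidable (Spec_snow S out) := by unfold Spec_snow; infer_instance

-- ===== CLAIM (what is proved, stated in full; the proofs are below) =====
def Claim_equal_snow : Prop := ∀ (S : List Int), Dom_snow S → Spec_snow S (snow S)

-- ===== LEMMAS AND PROOFS =====

-- "day i still gets its own fresh snow": the boundary predicate
def good (T : List Int) (i : Nat) : Prop := T.getD i 0 > (i : Int)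

-- on a descending list the predicate is downward closed
lemma good_mono (T : List Int) (hs : T.Pairwise (fun a b => b ≤ a))
    {i j : Nat} (hij : i ≤ j) (hj : j < T.length) (hg : good T j) : good T i := by
  unfold good at *
  rcases eq_or_lt_of_le hij with rfl | hlt
  · exact hg
  · have hle : T.getD j 0 ≤ T.getD i 0 := by
      rw [List.getD_eq_getElem _ _ hj, List.getD_eq_getElem _ _ (lt_trans hlt hj)]
      exact (List.pairwise_iff_getElem.mp hs) i j _ hj hlt
    have : (i : Int) < (j : Int) := by exact_mod_cast hlt
    omega

-- the binary search returns the unique boundary of a downward-closed predicate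
lemma bsearch_spec (T : List Int) (hs : T.Pairwise (fun a b => b ≤ a)) :
    ∀ (fuel lo hi : Nat), hi - lo ≤ fuel → lo ≤ hi → hi ≤ T.length →
    (∀ i, i < lo → good T i) → (∀ i, hi ≤ i → i < T.length → ¬ good T i) →
    bsearch T lo hi ≤ T.length ∧
      (∀ i, i < bsearch T lo hi → good T i) ∧
      (∀ i, bsearch T lo hi ≤ i → i < T.length → ¬ good T i) := by
  intro fuel
  induction fuel with
  | zero =>
    intro lo hi hfuel hle hhi hpre hpost
    have : lo = hi := by omega
    subst this
    rw [bsearch]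
    simp only [lt_irrefl, dite_false]
    exact ⟨hhi, hpre, hpost⟩
  | succ fuel ih =>
    intro lo hi hfuel hle hhi hpre hpost
    rw [bsearch]
    by_cases h : lo < hi
    · simp only [dif_pos h]
      have hmid1 : lo ≤ (lo + hi) / 2 := by omega
      have hmid2 : (lo + hi) / 2 < hi := by omega
      by_cases hg : T.getD ((lo + hi) / 2) 0 > (((lo + hi) / 2 : Nat) : Int)
      · simp only [if_pos hg]
        have hg' : good T ((lo + hi) / 2) := hg
        exact ih _ _ (by omega) (by omega) hhi
          (fun i hi' => good_mono T hs (by omega) (by omega) hg') hpost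
      · simp only [if_neg hg]
        refine ih _ _ (by omega) (by omega) (by omega) hpre ?_
        intro i hi1 hi2 hgi
        exact hg (good_mono T hs hi1 hi2 hgi)
    · simp only [dif_neg h]
      have : lo = hi := by omega
      subst this
      exact ⟨hhi, hpre, hpost⟩

-- the prefix-sum table: P[d] = a + sum of the first d elements
lemma psums_getD (T : List Int) : ∀ (a : Int) (d : Nat), d ≤ T.length →
    (psums a T).getD d 0 = a + (T.take d).sum := by
  induction T with
  | nil =>
    intro a d hd
    simp only [List.length_nil, Nat.le_zero] at hd
    subst hd
    simp [psums]
  | cons x xs ih =>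
    intro a d hd
    cases d with
    | zero => simp [psums]
    | succ d =>
      simp only [psums, List.getD_cons_succ, List.take_succ_cons, List.sum_cons]
      rw [ih (a + x) d (by simpa using hd)]
      ring

-- A's greedy loop, characterised by the boundary d: starting at day k ≤ d on the
-- suffix dropped at k, it stops exactly at d having added the snow of days k..d-1
lemma snowLoop_char (T : List Int) (d : Nat) (hd : d ≤ T.length)
    (hgood : ∀ i, i < d → good T i) (hstop : d < T.length → ¬ good T d) :
    ∀ (k : Nat) (s : Int), k ≤ d →
      snowLoop (T.drop k) (k : Int) s = ((d : Int), s + ((T.drop k).take (d - k)).sum) := by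
  intro k
  induction hk : d - k generalizing k with
  | zero =>
    intro s hkd
    have : k = d := by omega
    subst this
    by_cases hn : k < T.length
    · rw [← List.getElem_cons_drop hn]
      have : ¬ T[k] > (k : Int) := by
        intro hgt
        exact (hstop hn) (by unfold good; rwa [List.getD_eq_getElem _ _ hn])
      simp [snowLoop, this]
    · have : T.drop k = [] := List.drop_eq_nil_of_le (by omega)
      simp [this, snowLoop]
  | succ m ihm =>
    intro s hkd
    have hkn : k < T.length := by omega
    rw [← List.getElem_cons_drop hkn]
    have hgt : T[k] > (k : Int) := by
      have := hgood k (by omega)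
      unfold good at this
      rwa [List.getD_eq_getElem _ _ hkn] at this
    simp only [snowLoop, if_pos hgt]
    have hcast : (k : Int) + 1 = ((k + 1 : Nat) : Int) := by push_cast; ring
    rw [hcast, ihm (k + 1) (by omega) (s + T[k]) (by omega)]
    simp only [List.take_succ_cons, List.sum_cons, Prod.mk.injEq]
    exact ⟨trivial, by ring⟩

-- ===== VERDICT (by name: the statement is the Claim_ definition above) =====
theorem snow_spec : Claim_equal_snow := by
  intro S _
  unfold Spec_snow snow snow_alt
  simp only []
  set T := PySem.List.sorted S (fun x => x) true with hT
  have hs : T.Pairwise (fun a b => b ≤ a) := PySem.List.sorted_pairwise_rev S (fun x => x)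
  obtain ⟨hdn, hgood, hpost⟩ := bsearch_spec T hs T.length 0 T.length (by omega) (by omega)
    le_rfl (by omega) (by intro i h1 h2; omega)
  set d := bsearch T 0 T.length with hd
  have hloop := snowLoop_char T d hdn hgood (fun h => hpost d le_rfl h) 0 0 (by omega)
  simp only [Nat.cast_zero, List.drop_zero, Nat.sub_zero, zero_add] at hloop
  rw [hloop, psums_getD T 0 d hdn]
  ring
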